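-- pv_equiv track=rewrite | github.com/bran207/Edgar-Scrape---WARN-Act | WarnActNotices.py | getThreeWordsAfter
-- ===== SOURCE A (Python) =====
-- def getThreeWordsAfter(text,occurance):
--     counter = 0
--     num = 0
--     startNumber = 0
--     endNumber = 0
--     try:
--         while True:
--             if text[occurance+num] == " ":
--                 counter += 1
--             num += 1
--             if counter == 4:
--                 return text[occurance:occurance+num]
--     except:
--         return "N/A"
-- ===== SOURCE B (Python) =====
-- def getThreeWordsAfter(text, occurance):
--     parts = text[occurance:].split(' ', 4)
--     if len(parts) == 5:
--         return ' '.join(parts[:4]) + ' '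
--     return "N/A"
-- ===== Notes on version B (the rewrite author's own statement) =====
-- stated objective: simpler
-- what changed: B slices the tail text[occurance:] and uses str.split(' ', 4) plus a rejoin of the first four fields (with the trailing delimiter) instead of A's index-by-index while-True loop that counts spaces under a try/except; B also drops A's negative-index wraparound.
-- intended difference: For negative occurance A's indexing wraps from the end of the string back to its front (and its return slice can even come out empty), so where that wrap changes the outcome A returns an accidental slice such as '' while B returns the answer for the plain Python tail text[occurance:] ('N/A' at the witness), which is the intended reading of 'the words after this position'. — e.g. on getThreeWordsAfter("a b c d e", -3): A returns "", B returns "N/A"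
import Mathlib
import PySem

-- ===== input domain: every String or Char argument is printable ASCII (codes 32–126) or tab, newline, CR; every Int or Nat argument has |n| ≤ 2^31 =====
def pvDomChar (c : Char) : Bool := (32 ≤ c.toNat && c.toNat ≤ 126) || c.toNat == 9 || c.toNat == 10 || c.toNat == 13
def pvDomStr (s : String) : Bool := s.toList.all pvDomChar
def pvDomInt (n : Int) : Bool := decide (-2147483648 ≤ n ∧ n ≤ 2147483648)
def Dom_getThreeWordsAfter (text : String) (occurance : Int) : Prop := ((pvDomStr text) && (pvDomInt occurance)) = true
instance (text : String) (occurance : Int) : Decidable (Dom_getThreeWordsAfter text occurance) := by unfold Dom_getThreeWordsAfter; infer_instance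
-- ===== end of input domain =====

-- B replaces A's character-by-character space-counting loop by slice + split(' ', 4) + rejoin;
-- on negative `occurance` A's index wraps past the end back to the front of the string (D_ below), B uses plain tail semantics.

-- ===== PORT A =====
-- helper for the port's termination: a successful pyGet? means the index is below the length
theorem pvGetSomeLt {α : Type} (cs : List α) (i : Int) (c : α)
    (h : PySem.List.pyGet? cs i = some c) : i < cs.length := by
  by_contra hge
  rw [(PySem.List.pyGet?_eq_none_iff cs i).2 (by
    intro hr; exact hge hr.2)] at h
  simp at h

-- the `while True` loop of A: `counter`/`num` as in the Python, IndexError → "N/A"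
def loopA (cs : List Char) (occ : Int) (counter num : Nat) : String :=
  match h : PySem.List.pyGet? cs (occ + num) with
  | none => "N/A"
  | some c =>
    let counter' := if c = ' ' then counter + 1 else counter
    if counter' = 4 then
      String.ofList (PySem.List.slice cs (some occ) (some (occ + ((num + 1 : Nat) : Int))))
    else loopA cs occ counter' (num + 1)
termination_by (cs.length - (occ + num)).toNat
decreasing_by
  have := pvGetSomeLt cs (occ + num) c h
  omega

def getThreeWordsAfter (text : String) (occurance : Int) : String :=
  loopA text.toList occurance 0 0

-- ===== PORT B =====
def getThreeWordsAfter_alt (text : String) (occurance : Int) : String :=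
  let sub := PySem.List.slice text.toList (some occurance) none
  let parts := PySem.Chars.splitOnMax sub [' '] 4
  if parts.length = 5 then
    String.ofList (PySem.Chars.join [' '] (parts.take 4) ++ [' '])
  else
    "N/A"

-- ===== PRECONDITION & SPEC =====
-- On negative `occurance` A's indexing wraps from the end of the string back to its front, so A returns an
-- empty or garbled slice (or "N/A") computed from tail-plus-whole-string; B returns the answer for the plain
-- Python tail text[occurance:], which is the intended reading of "the words after this position".
def D_getThreeWordsAfter (text : String) (occurance : Int) : Prop :=
  occurance < 0 ∧
  (let cs := text.toList
   let n := cs.length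
   let k := (-occurance).toNat
   if n < k then 4 ≤ cs.count ' '
   else
     let tail := cs.drop (n - k)
     (tail.getLast? = some ' ' ∧ tail.dropLast.count ' ' = 3)
     ∨ (tail.count ' ' < 4 ∧ 4 ≤ tail.count ' ' + cs.count ' '))
instance (text : String) (occurance : Int) : Decidable (D_getThreeWordsAfter text occurance) := by
  unfold D_getThreeWordsAfter; infer_instance

def Spec_getThreeWordsAfter (text : String) (occurance : Int) (out : String) : Prop :=
  ¬ D_getThreeWordsAfter text occurance → out = getThreeWordsAfter_alt text occurance
instance (text : String) (occurance : Int) (out : String) : Decidable (Spec_getThreeWordsAfter text occurance out) := by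
  unfold Spec_getThreeWordsAfter; infer_instance

def pvDiffWitness_getThreeWordsAfter : String × Int := ("a b c d e", -3)
def pvDiffWitnessOut_getThreeWordsAfter : String × String := ("", "N/A")

-- ===== CLAIM (what is proved, stated in full; the proofs are below) =====
def Claim_unchanged_getThreeWordsAfter : Prop := ∀ (text : String) (occurance : Int), Dom_getThreeWordsAfter text occurance → Spec_getThreeWordsAfter text occurance (getThreeWordsAfter text occurance)
def Claim_changed_getThreeWordsAfter : Prop := Dom_getThreeWordsAfter (pvDiffWitness_getThreeWordsAfter.1) (pvDiffWitness_getThreeWordsAfter.2) ∧ D_getThreeWordsAfter (pvDiffWitness_getThreeWordsAfter.1) (pvDiffWitness_getThreeWordsAfter.2) ∧ getThreeWordsAfter (pvDiffWitness_getThreeWordsAfter.1) (pvDiffWitness_getThreeWordsAfter.2) = pvDiffWitnessOut_getThreeWordsAfter.1 ∧ getThreeWordsAfter_alt (pvDiffWitness_getThreeWordsAfter.1) (pvDiffWitness_getThreeWordsAfter.2) = pvDiffWitnessOut_getThreeWordsAfter.2 ∧ pvDiffWitnessOut_getThreeWordsAfter.1 ≠ pvDiffWitnessOut_getThreeWordsA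fter.2
def Claim_exact_getThreeWordsAfter : Prop := ∀ (text : String) (occurance : Int), Dom_getThreeWordsAfter text occurance → D_getThreeWordsAfter text occurance → getThreeWordsAfter text occurance ≠ getThreeWordsAfter_alt text occurance

-- ===== LEMMAS AND PROOFS =====

-- chars consumed by a scan that stops right after the k-th space (none = fewer than k spaces)
def scanK : Nat → List Char → Option Nat
  | 0, _ => some 0
  | _+1, [] => none
  | k+1, x :: xs => if x = ' ' then (scanK k xs).map (· + 1) else (scanK (k+1) xs).map (· + 1)

theorem scanK_zero (l : List Char) : scanK 0 l = some 0 := by cases l <;> rfl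

theorem scanK_cons (k : Nat) (x : Char) (xs : List Char) :
    scanK (k + 1) (x :: xs) =
      if x = ' ' then (scanK k xs).map (· + 1) else (scanK (k + 1) xs).map (· + 1) := by
  simp only [scanK]

-- the sequence of characters A's wrap-around indexing reads from position i on
def charSeq (cs : List Char) (i : Int) : List Char :=
  if i < -(cs.length : Int) then []
  else if i < 0 then cs.drop (cs.length - (-i).toNat) ++ cs
  else cs.drop i.toNat

theorem charSeq_nil (cs : List Char) (i : Int)
    (h : PySem.List.pyGet? cs i = none) : charSeq cs i = [] := by
  rw [PySem.List.pyGet?_eq_none_iff] at h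
  unfold PySem.Raise.InRange at h
  unfold charSeq
  split
  · rfl
  · rename_i h1
    split
    · rename_i h2
      exact absurd ⟨by omega, by omega⟩ h
    · rename_i h2
      have hle : cs.length ≤ i.toNat := by omega
      simp [List.drop_eq_nil_of_le hle]

theorem charSeq_cons (cs : List Char) (i : Int) (c : Char)
    (h : PySem.List.pyGet? cs i = some c) : charSeq cs i = c :: charSeq cs (i + 1) := by
  have hlt : i < cs.length := pvGetSomeLt cs i c h
  have hge : -(cs.length : Int) ≤ i := by
    by_contra hx
    rw [(PySem.List.pyGet?_eq_none_iff cs i).2 (by intro hr; exact hx hr.1)] at h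
    simp at h
  by_cases hneg : i < 0
  · have hk : 0 < (-i).toNat := by omega
    have hkle : (-i).toNat ≤ cs.length := by omega
    have hidx : cs.length - (-i).toNat < cs.length := by omega
    have hc : c = cs[cs.length - (-i).toNat] := by
      rw [show i = -(((-i).toNat : Nat) : Int) by omega,
        PySem.List.pyGet?_neg_natCast cs (-i).toNat hk hkle,
        List.getElem?_eq_getElem hidx] at h
      injection h with h'
      exact h'.symm
    by_cases h1 : i + 1 < 0
    · have e1 : charSeq cs i = List.drop (cs.length - (-i).toNat) cs ++ cs := by
        unfold charSeq; rw [if_neg (by omega), if_pos hneg]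
      have e2 : charSeq cs (i + 1) = List.drop (cs.length - (-i).toNat + 1) cs ++ cs := by
        unfold charSeq; rw [if_neg (by omega), if_pos h1]
        congr 2; omega
      rw [e1, e2, hc, ← List.cons_append, ← List.drop_eq_getElem_cons hidx]
    · have hi1 : i + 1 = 0 := by omega
      have hk1 : (-i).toNat = 1 := by omega
      have hidx1 : cs.length - 1 < cs.length := by omega
      have hc1 : c = cs[cs.length - 1]'hidx1 := by rw [hc]; congr 1; omega
      have e1 : charSeq cs i = List.drop (cs.length - 1) cs ++ cs := by
        unfold charSeq; rw [if_neg (by omega), if_pos hneg, hk1]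
      have e2 : charSeq cs (i + 1) = cs := by
        rw [hi1]; unfold charSeq
        rw [if_neg (by omega), if_neg (by omega)]
        simp
      rw [e1, e2, hc1, List.drop_eq_getElem_cons hidx1,
        List.drop_eq_nil_of_le (by omega : cs.length ≤ cs.length - 1 + 1)]
      simp
  · have h0 : 0 ≤ i := by omega
    have hidx : i.toNat < cs.length := by omega
    have hc : c = cs[i.toNat] := by
      rw [PySem.List.pyGet?_of_nonneg cs h0, List.getElem?_eq_getElem hidx] at h
      injection h with h'
      exact h'.symm
    have e1 : charSeq cs i = List.drop i.toNat cs := by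
      unfold charSeq; rw [if_neg (by omega), if_neg (by omega)]
    have e2 : charSeq cs (i + 1) = List.drop (i.toNat + 1) cs := by
      unfold charSeq; rw [if_neg (by omega), if_neg (by omega)]
      congr 1; omega
    rw [e1, e2, hc, List.drop_eq_getElem_cons hidx]

theorem scanK_none_iff (k : Nat) (l : List Char) : scanK k l = none ↔ l.count ' ' < k := by
  induction l generalizing k with
  | nil => cases k <;> simp [scanK]
  | cons x xs ih =>
    cases k with
    | zero => simp [scanK]
    | succ k' =>
      by_cases hx : x = ' '
      · subst hx
        simp [scanK, Option.map_eq_none_iff, ih k']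
        try omega
      · simp [scanK, hx, Option.map_eq_none_iff, ih (k'+1)]
        try omega

theorem scanK_some_le (k : Nat) (l : List Char) (m : Nat) (h : scanK k l = some m) : m ≤ l.length := by
  induction l generalizing k m with
  | nil =>
    cases k with
    | zero => simp [scanK] at h; omega
    | succ => simp [scanK] at h
  | cons x xs ih =>
    cases k with
    | zero => simp [scanK] at h; omega
    | succ k' =>
      by_cases hx : x = ' '
      · subst hx
        simp only [scanK, ite_true, Option.map_eq_some_iff] at h
        obtain ⟨m', hm', rfl⟩ := h
        have := ih _ _ hm'
        simp
        omega
      · simp only [scanK, hx, ite_false, Option.map_eq_some_iff] at h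
        obtain ⟨m', hm', rfl⟩ := h
        have := ih _ _ hm'
        simp
        omega

theorem pvGetLastCons {x : Char} {xs : List Char} (h : xs ≠ []) :
    (x :: xs).getLast? = xs.getLast? := by
  cases xs with
  | nil => exact absurd rfl h
  | cons y ys => simp [List.getLast?_cons_cons]

theorem scanK_eq_length (k : Nat) (l : List Char) (hk : 1 ≤ k)
    (h : scanK k l = some l.length) : l.getLast? = some ' ' ∧ l.dropLast.count ' ' = k - 1 := by
  induction l generalizing k with
  | nil =>
    cases k with
    | zero => omega
    | succ => simp [scanK] at h
  | cons x xs ih =>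
    cases k with
    | zero => omega
    | succ k' =>
      by_cases hx : x = ' '
      · subst hx
        simp only [scanK, ite_true, List.length_cons, Option.map_eq_some_iff] at h
        obtain ⟨m', hm', hlen⟩ := h
        have hm : m' = xs.length := by omega
        subst hm
        cases k' with
        | zero =>
          have hxs : xs = [] := by
            cases xs with
            | nil => rfl
            | cons y ys => simp [scanK] at hm'; try omega
          subst hxs
          simp
        | succ k'' =>
          have hres := ih (k''+1) (by omega) hm'
          have hxs : xs ≠ [] := by
            intro hn; subst hn; simp [scanK] at hm'
          refine ⟨?_, ?_⟩
          · rw [pvGetLastCons hxs]; exact hres.1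
          · rw [List.dropLast_cons_of_ne_nil hxs]
            simp [hres.2]
            try omega
      · simp only [scanK, hx, ite_false, List.length_cons, Option.map_eq_some_iff] at h
        obtain ⟨m', hm', hlen⟩ := h
        have hm : m' = xs.length := by omega
        subst hm
        have hres := ih (k'+1) (by omega) hm'
        have hxs : xs ≠ [] := by
          intro hn; subst hn; simp [scanK] at hm'
        refine ⟨?_, ?_⟩
        · rw [pvGetLastCons hxs]; exact hres.1
        · rw [List.dropLast_cons_of_ne_nil hxs]
          simp [hx, hres.2]

theorem scanK_append_some (k : Nat) (l1 l2 : List Char) (m : Nat)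
    (h : scanK k l1 = some m) : scanK k (l1 ++ l2) = some m := by
  induction l1 generalizing k m with
  | nil =>
    cases k with
    | zero => simpa [scanK] using h
    | succ => simp [scanK] at h
  | cons x xs ih =>
    cases k with
    | zero => simpa [scanK] using h
    | succ k' =>
      by_cases hx : x = ' '
      · subst hx
        simp only [scanK, ite_true, List.cons_append, Option.map_eq_some_iff] at h ⊢
        obtain ⟨m', hm', rfl⟩ := h
        exact ⟨m', ih _ _ hm', rfl⟩
      · simp only [scanK, hx, ite_false, List.cons_append, Option.map_eq_some_iff] at h ⊢
        obtain ⟨m', hm', rfl⟩ := h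
        exact ⟨m', ih _ _ hm', rfl⟩

theorem scanK_append_none (k : Nat) (l1 l2 : List Char)
    (h : scanK k l1 = none) :
    scanK k (l1 ++ l2) = (scanK (k - l1.count ' ') l2).map (· + l1.length) := by
  induction l1 generalizing k with
  | nil => simp
  | cons x xs ih =>
    cases k with
    | zero => simp [scanK] at h
    | succ k' =>
      by_cases hx : x = ' '
      · subst hx
        simp only [scanK, ite_true, List.cons_append, Option.map_eq_none_iff] at h ⊢
        rw [ih k' h, Option.map_map]
        have e1 : k' + 1 - ((' ' :: xs).count ' ') = k' - xs.count ' ' := by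
          rw [List.count_cons_self]; omega
        rw [e1]
        try congr 1
        try funext a
        try simp [Function.comp, List.length_cons]
        try omega
      · simp only [scanK, hx, ite_false, List.cons_append, Option.map_eq_none_iff] at h ⊢
        rw [ih (k'+1) h, Option.map_map]
        have e1 : k' + 1 - ((x :: xs).count ' ') = k' + 1 - xs.count ' ' := by
          rw [List.count_cons_of_ne hx]
        rw [e1]
        try congr 1
        try funext a
        try simp [Function.comp, List.length_cons]
        try omega

-- Python's  s.split(' ', k)  as a direct recursion
def mySplit : Nat → List Char → List Char → List (List Char)
  | 0, pre, l => [pre ++ l]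
  | _+1, pre, [] => [pre]
  | k+1, pre, c :: rest =>
    if c = ' ' then pre :: mySplit k [] rest else mySplit (k+1) (pre ++ [c]) rest
termination_by _ _ l => l.length

theorem go_spec (fuel : Nat) : ∀ (l cur : List Char) (k : Nat) (acc : List (List Char)),
    l.length < fuel →
    PySem.Chars.splitOnMax.go [' '] fuel k l cur acc = acc.reverse ++ mySplit k cur.reverse l := by
  induction fuel with
  | zero => intro l cur k acc h; omega
  | succ fuel ih =>
    intro l cur k acc h
    cases l with
    | nil =>
      cases k <;> simp [PySem.Chars.splitOnMax.go, mySplit]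
    | cons c rest =>
      cases k with
      | zero =>
        simp [PySem.Chars.splitOnMax.go, mySplit]
      | succ k' =>
        simp only [PySem.Chars.splitOnMax.go, if_neg (Nat.succ_ne_zero k')]
        by_cases hc : c = ' '
        · subst hc
          have hpre : [' '].isPrefixOf (' ' :: rest) = true := by simp [List.isPrefixOf]
          rw [if_pos hpre]
          simp only [List.length_nil, List.length_cons, Nat.zero_add, List.drop_succ_cons,
            List.drop_zero, Nat.add_sub_cancel]
          rw [ih rest [] k' (cur.reverse :: acc) (by simpa using Nat.lt_of_succ_lt_succ h)]
          simp [mySplit]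
        · have hpre : [' '].isPrefixOf (c :: rest) = false := by
            simp [List.isPrefixOf]
            exact Ne.symm hc
          rw [if_neg (by simp [hpre])]
          rw [ih rest (c :: cur) (k'+1) acc (by simpa using Nat.lt_of_succ_lt_succ h)]
          simp [mySplit, hc]

theorem splitOnMax_eq (l : List Char) :
    PySem.Chars.splitOnMax l [' '] 4 = mySplit 4 [] l := by
  unfold PySem.Chars.splitOnMax
  rw [if_neg (by norm_num)]
  simpa using go_spec (l.length + 1) l [] 4 [] (Nat.lt_succ_self _)

theorem mySplit_none (l : List Char) : ∀ (k : Nat) (pre : List Char),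
    scanK k l = none → (mySplit k pre l).length < k + 1 := by
  induction l with
  | nil =>
    intro k pre h
    cases k with
    | zero => simp [scanK] at h
    | succ k' => simp [mySplit]
  | cons c rest ih =>
    intro k pre h
    cases k with
    | zero => simp [scanK] at h
    | succ k' =>
      by_cases hc : c = ' '
      · subst hc
        simp only [scanK, ite_true, Option.map_eq_none_iff] at h
        cases k' with
        | zero => rw [scanK_zero] at h; simp at h
        | succ k'' =>
          simp only [mySplit, ite_true, List.length_cons]
          have := ih (k''+1) [] h
          omega
      · simp only [scanK, hc, ite_false, Option.map_eq_none_iff] at h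
        simp only [mySplit, hc, ite_false]
        exact ih (k'+1) (pre ++ [c]) h

-- one unfolding step of List.intercalate on two or more pieces
theorem pvInterCons (s a b : List Char) (t : List (List Char)) :
    List.intercalate s (a :: b :: t) = a ++ s ++ List.intercalate s (b :: t) := by
  simp [List.intercalate, List.intersperse]

theorem mySplit_some (l : List Char) : ∀ (k : Nat) (pre : List Char) (m : Nat),
    1 ≤ k → scanK k l = some m →
    (mySplit k pre l).length = k + 1 ∧
    List.intercalate [' '] ((mySplit k pre l).take k) ++ [' '] = pre ++ l.take m := by
  induction l with
  | nil =>
    intro k pre m hk h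
    cases k with
    | zero => omega
    | succ k' => simp [scanK] at h
  | cons c rest ih =>
    intro k pre m hk h
    cases k with
    | zero => omega
    | succ k' =>
      by_cases hc : c = ' '
      · subst hc
        simp only [scanK, ite_true, Option.map_eq_some_iff] at h
        obtain ⟨m', hm', rfl⟩ := h
        cases k' with
        | zero =>
          have hm : m' = 0 := by rw [scanK_zero] at hm'; injection hm' with hm''; omega
          subst hm
          simp [mySplit, List.intercalate]
        | succ k'' =>
          have hres := ih (k''+1) [] m' (by omega) hm'
          simp only [mySplit, ite_true]
          refine ⟨by simp [hres.1], ?_⟩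
          have hne : (mySplit (k''+1) [] rest).take (k''+1) ≠ [] := by
            intro hn
            have : ((mySplit (k''+1) [] rest).take (k''+1)).length = 0 := by rw [hn]; rfl
            rw [List.length_take, hres.1] at this
            omega
          rw [List.take_succ_cons]
          cases hts : (mySplit (k''+1) [] rest).take (k''+1) with
          | nil => exact absurd hts hne
          | cons t ts =>
            rw [pvInterCons]
            have h2 := hres.2
            rw [hts] at h2
            calc (pre ++ [' '] ++ List.intercalate [' '] (t :: ts)) ++ [' ']
                = pre ++ [' '] ++ (List.intercalate [' '] (t :: ts) ++ [' ']) := by simp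
              _ = pre ++ [' '] ++ ([] ++ rest.take m') := by rw [h2]
              _ = pre ++ List.take (m' + 1) (' ' :: rest) := by simp [List.take_succ_cons]
          -- note: take index differs; fixed below
      · simp only [scanK, hc, ite_false, Option.map_eq_some_iff] at h
        obtain ⟨m', hm', rfl⟩ := h
        have hres := ih (k'+1) (pre ++ [c]) m' (by omega) hm'
        simp only [mySplit, hc, ite_false]
        refine ⟨hres.1, ?_⟩
        rw [hres.2, List.take_succ_cons]
        simp

-- characterisation of A's loop via scanK over the wrap-around character sequence
theorem loopA_char (F : Nat) : ∀ (cs : List Char) (occ : Int) (k num : Nat),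
    1 ≤ k → k ≤ 4 → (cs.length - (occ + num)).toNat ≤ F →
    loopA cs occ (4 - k) num =
      match scanK k (charSeq cs (occ + num)) with
      | some m => String.ofList (PySem.List.slice cs (some occ) (some (occ + num + m)))
      | none => "N/A" := by
  induction F with
  | zero =>
    intro cs occ k num hk1 hk4 hF
    have hnone : PySem.List.pyGet? cs (occ + num) = none := by
      rw [PySem.List.pyGet?_eq_none_iff]
      intro hr
      obtain ⟨hr1, hr2⟩ := hr
      omega
    rw [loopA]
    split
    · rw [charSeq_nil cs _ hnone]
      obtain ⟨k', rfl⟩ : ∃ k', k = k' + 1 := ⟨k - 1, by omega⟩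
      simp [scanK]
    · rename_i c heq
      rw [hnone] at heq
      simp at heq
  | succ F ih =>
    intro cs occ k num hk1 hk4 hF
    rw [loopA]
    split
    · rename_i heq
      rw [charSeq_nil cs _ heq]
      obtain ⟨k', rfl⟩ : ∃ k', k = k' + 1 := ⟨k - 1, by omega⟩
      simp [scanK]
    · rename_i ch heq
      have hlt : occ + num < cs.length := pvGetSomeLt cs _ ch heq
      rw [charSeq_cons cs _ ch heq]
      have hcast : occ + ((num : Int) + 1) = occ + ((num + 1 : Nat) : Int) := by push_cast; ring
      by_cases hch : ch = ' '
      · subst hch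
        simp only [ite_true]
        by_cases hkone : k = 1
        · subst hkone
          rw [if_pos (by omega)]
          simp only [scanK, ite_true, Option.map_some]
          rw [show occ + ((num + 1 : Nat) : Int) = occ + (num : Int) + ((1 : Nat) : Int) by push_cast; ring]
        · rw [if_neg (by omega)]
          have hcounter : 4 - k + 1 = 4 - (k - 1) := by omega
          rw [hcounter, ih cs occ (k - 1) (num + 1) (by omega) (by omega) (by omega)]
          obtain ⟨k', rfl⟩ : ∃ k', k = k' + 1 := ⟨k - 1, by omega⟩
          simp only [Nat.add_sub_cancel]
          simp only [scanK, ite_true]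
          rw [show ((num + 1 : Nat) : Int) = (num : Int) + 1 by push_cast; ring]
          cases hsk : scanK k' (charSeq cs (occ + ((num : Int) + 1))) with
          | none =>
            rw [show occ + ((num : Int) + 1) = occ + (num : Int) + 1 by ring] at hsk
            rw [hsk]
            rfl
          | some m =>
            rw [show occ + ((num : Int) + 1) = occ + (num : Int) + 1 by ring] at hsk
            rw [hsk]
            simp only [Option.map_some]
            rw [show occ + ((num : Int) + 1) + (m : Int) = occ + (num : Int) + ((m + 1 : Nat) : Int) by push_cast; ring]
      · simp only [hch, ite_false]
        rw [if_neg (by omega)]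
        rw [ih cs occ k (num + 1) (by omega) (by omega) (by omega)]
        obtain ⟨k', rfl⟩ : ∃ k', k = k' + 1 := ⟨k - 1, by omega⟩
        simp only [scanK, hch, ite_false]
        rw [show ((num + 1 : Nat) : Int) = (num : Int) + 1 by push_cast; ring]
        cases hsk : scanK (k' + 1) (charSeq cs (occ + ((num : Int) + 1))) with
        | none =>
          rw [show occ + ((num : Int) + 1) = occ + (num : Int) + 1 by ring] at hsk
          rw [hsk]
          rfl
        | some m =>
          rw [show occ + ((num : Int) + 1) = occ + (num : Int) + 1 by ring] at hsk
          rw [hsk]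
          simp only [Option.map_some]
          rw [show occ + ((num : Int) + 1) + (m : Int) = occ + (num : Int) + ((m + 1 : Nat) : Int) by push_cast; ring]

theorem scanK_some_of (k : Nat) (l : List Char) (h : k ≤ l.count ' ') :
    ∃ m, scanK k l = some m := by
  cases hsk : scanK k l with
  | none => rw [scanK_none_iff] at hsk; omega
  | some m => exact ⟨m, rfl⟩

-- a successful scan consumes at least one character and ends on the space it stopped at
theorem scanK_last (k : Nat) (l : List Char) (m : Nat) (hk : 1 ≤ k) (h : scanK k l = some m) :
    1 ≤ m ∧ (l.take m).getLast? = some ' ' := by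
  induction l generalizing k m with
  | nil =>
    cases k with
    | zero => omega
    | succ => simp [scanK] at h
  | cons x xs ih =>
    cases k with
    | zero => omega
    | succ k' =>
      by_cases hx : x = ' '
      · subst hx
        simp only [scanK, ite_true, Option.map_eq_some_iff] at h
        obtain ⟨m', hm', rfl⟩ := h
        cases k' with
        | zero =>
          have hm : m' = 0 := by rw [scanK_zero] at hm'; injection hm' with hh; omega
          subst hm
          simp
        | succ k'' =>
          have hres := ih (k''+1) m' (by omega) hm'
          have hne : xs.take m' ≠ [] := by
            intro hnil; rw [hnil] at hres; simp at hres
          refine ⟨by omega, ?_⟩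
          rw [List.take_succ_cons, pvGetLastCons hne]
          exact hres.2
      · simp only [scanK, hx, ite_false, Option.map_eq_some_iff] at h
        obtain ⟨m', hm', rfl⟩ := h
        have hres := ih (k'+1) m' (by omega) hm'
        have hne : xs.take m' ≠ [] := by
          intro hnil; rw [hnil] at hres; simp at hres
        refine ⟨by omega, ?_⟩
        rw [List.take_succ_cons, pvGetLastCons hne]
        exact hres.2

-- converse of scanK_eq_length: if the k-th space is the very last character, the scan eats everything
theorem scanK_length_of (k : Nat) (l : List Char) (hk : 1 ≤ k)
    (hlast : l.getLast? = some ' ') (hcnt : l.dropLast.count ' ' = k - 1) :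
    scanK k l = some l.length := by
  induction l generalizing k with
  | nil => simp at hlast
  | cons x xs ih =>
    cases xs with
    | nil =>
      simp at hlast hcnt
      subst hlast
      have hk1 : k = 1 := by omega
      subst hk1
      simp [scanK]
    | cons y ys =>
      have hne : (y :: ys) ≠ ([] : List Char) := by simp
      rw [pvGetLastCons hne] at hlast
      rw [List.dropLast_cons_of_ne_nil hne] at hcnt
      obtain ⟨k', rfl⟩ : ∃ k', k = k' + 1 := ⟨k - 1, by omega⟩
      by_cases hx : x = ' '
      · subst hx
        rw [List.count_cons_self] at hcnt
        have hk2 : 1 ≤ k' := by omega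
        have hr := ih k' hk2 hlast (by omega)
        simp only [scanK, ite_true]
        rw [hr]
        simp [List.length_cons]
      · rw [List.count_cons_of_ne hx] at hcnt
        have hr := ih (k'+1) (by omega) hlast (by omega)
        rw [scanK_cons, if_neg hx, hr]
        simp [List.length_cons]

theorem pvGetLastDrop (l : List Char) (n : Nat) (h : n < l.length) :
    (l.drop n).getLast? = l.getLast? := by
  rw [List.getLast?_eq_getElem?, List.getLast?_eq_getElem?, List.getElem?_drop, List.length_drop]
  congr 1
  omega

theorem pvOfListInj (l1 l2 : List Char) (h : String.ofList l1 = String.ofList l2) : l1 = l2 := by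
  have h2 := congrArg String.toList h
  simpa using h2

theorem pvOfListNe (l : List Char) (h : l.getLast? ≠ some 'A') : String.ofList l ≠ "N/A" := by
  intro he
  have h2 : l = ['N', '/', 'A'] := by
    have h3 := congrArg String.toList he
    simpa using h3
  subst h2
  simp at h

-- the value of A on any input, as a function of the character sequence it scans
theorem A_char (cs : List Char) (occ : Int) :
    loopA cs occ 0 0 =
      match scanK 4 (charSeq cs occ) with
      | some m => String.ofList (PySem.List.slice cs (some occ) (some (occ + m)))
      | none => "N/A" := by
  have h := loopA_char (cs.length - occ).toNat cs occ 4 0 (by norm_num) (by norm_num) (by omega)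
  norm_num at h
  exact h

-- ===== VERDICT (by name: the statement is the Claim_ definition above) =====
theorem getThreeWordsAfter_spec : Claim_unchanged_getThreeWordsAfter := by
  intro text occ _hDom
  unfold Spec_getThreeWordsAfter
  intro hND
  unfold getThreeWordsAfter getThreeWordsAfter_alt
  simp only [PySem.List.slice_some_none, splitOnMax_eq, PySem.Chars.join]
  rw [A_char]
  by_cases hocc : 0 ≤ occ
  · -- nonnegative start: both sides scan the plain tail
    have hcseq : charSeq text.toList occ = List.drop occ.toNat text.toList := by
      unfold charSeq; rw [if_neg (by omega), if_neg (by omega)]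
    have hclamp : List.drop (PySem.List.clampIdx text.toList.length occ) text.toList
        = List.drop occ.toNat text.toList := by
      unfold PySem.List.clampIdx
      rw [if_neg (by omega)]
      by_cases hle : occ.toNat ≤ text.toList.length
      · rw [min_eq_left hle]
      · rw [min_eq_right (by omega), List.drop_eq_nil_of_le (le_refl _),
          List.drop_eq_nil_of_le (by omega)]
    rw [hcseq, hclamp]
    cases hsk : scanK 4 (List.drop occ.toNat text.toList) with
    | none =>
      have h5 := mySplit_none _ 4 [] hsk
      rw [if_neg (by omega)]
    | some m =>
      have hs := mySplit_some _ 4 [] m (by norm_num) hsk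
      rw [if_pos (by omega)]
      have hslice : PySem.List.slice text.toList (some occ) (some (occ + (m : Int)))
          = List.take m (List.drop occ.toNat text.toList) := by
        rw [PySem.List.slice_toNat text.toList hocc (by omega)]
        congr 1
        omega
      show String.ofList (PySem.List.slice text.toList (some occ) (some (occ + (m : Int)))) = _
      rw [hslice]
      congr 1
      rw [hs.2]
      simp
  · -- negative start
    obtain ⟨k, hocck⟩ : ∃ k : Nat, occ = -((k : Nat) : Int) := ⟨(-occ).toNat, by omega⟩
    have hk : 0 < k := by omega
    have htonat : (-occ).toNat = k := by omega
    have hX0 : ¬ (if text.toList.length < k then 4 ≤ text.toList.count ' '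
        else ((List.drop (text.toList.length - k) text.toList).getLast? = some ' '
              ∧ (List.drop (text.toList.length - k) text.toList).dropLast.count ' ' = 3)
           ∨ ((List.drop (text.toList.length - k) text.toList).count ' ' < 4
              ∧ 4 ≤ (List.drop (text.toList.length - k) text.toList).count ' ' + text.toList.count ' ')) := by
      intro hx
      exact hND ⟨by omega, by simpa [htonat] using hx⟩
    have hclamp : PySem.List.clampIdx text.toList.length occ = text.toList.length - k := by
      rw [hocck]; exact PySem.List.clampIdx_neg_natCast _ k hk
    rw [hclamp]
    by_cases hnk : text.toList.length < k
    · -- start before the beginning: A raises at once, B scans the whole string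
      rw [if_pos hnk] at hX0
      have hcseq : charSeq text.toList occ = [] := by
        unfold charSeq; rw [if_pos (by omega)]
      rw [hcseq]
      have hz : text.toList.length - k = 0 := by omega
      rw [hz, List.drop_zero]
      have hsk : scanK 4 text.toList = none := by rw [scanK_none_iff]; omega
      have h5 := mySplit_none text.toList 4 [] hsk
      have ha : scanK 4 ([] : List Char) = none := by simp [scanK]
      rw [ha, if_neg (by omega)]
    · -- start inside the string: A scans tail ++ whole string, B only the tail
      rw [if_neg hnk] at hX0
      have hX := not_or.mp hX0
      have htlen : (List.drop (text.toList.length - k) text.toList).length = k := by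
        rw [List.length_drop]; omega
      have hcseq : charSeq text.toList occ
          = List.drop (text.toList.length - k) text.toList ++ text.toList := by
        unfold charSeq
        rw [if_neg (by omega), if_pos (by omega), htonat]
      rw [hcseq]
      cases hsk : scanK 4 (List.drop (text.toList.length - k) text.toList) with
      | none =>
        have hct := (scanK_none_iff 4 _).mp hsk
        have hsum : (List.drop (text.toList.length - k) text.toList).count ' '
            + text.toList.count ' ' < 4 := by
          by_contra hx
          exact hX.2 ⟨hct, by omega⟩
        have hrest : scanK (4 - (List.drop (text.toList.length - k) text.toList).count ' ')
            text.toList = none := by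
          rw [scanK_none_iff]; omega
        rw [scanK_append_none 4 _ _ hsk, hrest]
        have h5 := mySplit_none _ 4 [] hsk
        rw [if_neg (by omega)]
        rfl
      | some m =>
        have hmle : m ≤ (List.drop (text.toList.length - k) text.toList).length :=
          scanK_some_le 4 _ m hsk
        have hmne : m ≠ k := by
          intro hmk
          apply hX.1
          have heq : scanK 4 (List.drop (text.toList.length - k) text.toList)
              = some (List.drop (text.toList.length - k) text.toList).length := by
            rw [hsk, htlen, hmk]
          exact scanK_eq_length 4 _ (by norm_num) heq
        have hmk : m < k := by omega
        rw [scanK_append_some 4 _ _ m hsk]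
        have hs := mySplit_some _ 4 [] m (by norm_num) hsk
        rw [if_pos (by omega)]
        have hslice : PySem.List.slice text.toList (some occ) (some (occ + (m : Int)))
            = List.take m (List.drop (text.toList.length - k) text.toList) := by
          rw [hocck, show (-((k : Nat) : Int)) + (m : Int) = -(((k - m : Nat)) : Int) by omega]
          show List.take (PySem.List.clampIdx text.toList.length (-(((k - m : Nat)) : Int))
              - PySem.List.clampIdx text.toList.length (-((k : Nat) : Int)))
            (List.drop (PySem.List.clampIdx text.toList.length (-((k : Nat) : Int))) text.toList) = _
          rw [PySem.List.clampIdx_neg_natCast _ k hk,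
            PySem.List.clampIdx_neg_natCast _ (k - m) (by omega)]
          congr 1
          omega
        show String.ofList (PySem.List.slice text.toList (some occ) (some (occ + (m : Int)))) = _
        rw [hslice]
        congr 1
        rw [hs.2]
        simp

theorem getThreeWordsAfter_changed : Claim_changed_getThreeWordsAfter := by
  unfold Claim_changed_getThreeWordsAfter
  refine ⟨by decide, by decide, ?_, by decide, by decide⟩
  show getThreeWordsAfter "a b c d e" (-3) = ""
  unfold getThreeWordsAfter
  rw [A_char]
  decide

theorem getThreeWordsAfter_tight : Claim_exact_getThreeWordsAfter := by
  intro text occ _hDom hD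
  obtain ⟨hocc, hbody⟩ := hD
  unfold getThreeWordsAfter getThreeWordsAfter_alt
  simp only [PySem.List.slice_some_none, splitOnMax_eq, PySem.Chars.join]
  rw [A_char]
  obtain ⟨k, hocck⟩ : ∃ k : Nat, occ = -((k : Nat) : Int) := ⟨(-occ).toNat, by omega⟩
  have hk : 0 < k := by omega
  have htonat : (-occ).toNat = k := by omega
  simp only [htonat] at hbody
  have hclamp : PySem.List.clampIdx text.toList.length occ = text.toList.length - k := by
    rw [hocck]; exact PySem.List.clampIdx_neg_natCast _ k hk
  rw [hclamp]
  by_cases hnk : text.toList.length < k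
  · -- A raises at once ("N/A"); B finds four spaces in the whole string
    rw [if_pos hnk] at hbody
    have hcseq : charSeq text.toList occ = [] := by
      unfold charSeq; rw [if_pos (by omega)]
    rw [hcseq]
    have hz : text.toList.length - k = 0 := by omega
    rw [hz, List.drop_zero]
    have ha : scanK 4 ([] : List Char) = none := by simp [scanK]
    rw [ha]
    obtain ⟨m, hsk⟩ := scanK_some_of 4 text.toList hbody
    have hs := mySplit_some _ 4 [] m (by norm_num) hsk
    rw [if_pos (by omega), hs.2]
    have hlast := (scanK_last 4 text.toList m (by norm_num) hsk).2
    intro he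
    refine pvOfListNe ([] ++ List.take m text.toList) ?_
      (show String.ofList ([] ++ List.take m text.toList) = "N/A" from he.symm)
    rw [List.nil_append, hlast]
    decide
  · rw [if_neg hnk] at hbody
    have htlen : (List.drop (text.toList.length - k) text.toList).length = k := by
      rw [List.length_drop]; omega
    have hcseq : charSeq text.toList occ
        = List.drop (text.toList.length - k) text.toList ++ text.toList := by
      unfold charSeq; rw [if_neg (by omega), if_pos (by omega), htonat]
    rw [hcseq]
    rcases hbody with h1 | h2
    · -- the fourth space is the last character: A returns the empty slice, B the whole tail
      have hskt : scanK 4 (List.drop (text.toList.length - k) text.toList)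
          = some (List.drop (text.toList.length - k) text.toList).length :=
        scanK_length_of 4 _ (by norm_num) h1.1 h1.2
      rw [htlen] at hskt
      rw [scanK_append_some 4 _ _ k hskt]
      have hs := mySplit_some _ 4 [] k (by norm_num) hskt
      rw [if_pos (by omega), hs.2]
      have hslice : PySem.List.slice text.toList (some occ) (some (occ + (k : Int))) = [] := by
        rw [show occ + (k : Int) = 0 by omega, hocck]
        show List.take (PySem.List.clampIdx text.toList.length 0
            - PySem.List.clampIdx text.toList.length (-((k : Nat) : Int)))
          (List.drop (PySem.List.clampIdx text.toList.length (-((k : Nat) : Int))) text.toList) = []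
        rw [PySem.List.clampIdx_neg_natCast _ k hk]
        have h0 : PySem.List.clampIdx text.toList.length 0 = 0 := by
          unfold PySem.List.clampIdx; simp
        rw [h0]
        simp
      show ¬ (String.ofList (PySem.List.slice text.toList (some occ) (some (occ + (k : Int))))
          = String.ofList ([] ++ List.take k (List.drop (text.toList.length - k) text.toList)))
      rw [hslice]
      intro he
      have heq := pvOfListInj _ _ he
      rw [List.nil_append, List.take_of_length_le (by omega)] at heq
      rw [← heq] at h1
      simp at h1
    · -- fewer than four spaces in the tail, but enough after wrapping: A returns a slice, B "N/A"
      have hsk : scanK 4 (List.drop (text.toList.length - k) text.toList) = none := by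
        rw [scanK_none_iff]; omega
      have h5 := mySplit_none _ 4 [] hsk
      rw [scanK_append_none 4 _ _ hsk, if_neg (by omega)]
      obtain ⟨j, hj⟩ := scanK_some_of (4 - (List.drop (text.toList.length - k) text.toList).count ' ')
        text.toList (by omega)
      rw [hj]
      simp only [Option.map_some]
      have hjle : j ≤ text.toList.length := scanK_some_le _ _ _ hj
      have hjlast := (scanK_last _ _ j (by omega) hj).2
      show ¬ (String.ofList (PySem.List.slice text.toList (some occ)
          (some (occ + ((j + (List.drop (text.toList.length - k) text.toList).length : Nat) : Int))))
        = "N/A")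
      rw [show occ + ((j + (List.drop (text.toList.length - k) text.toList).length : Nat) : Int)
          = ((j : Nat) : Int) by rw [htlen]; push_cast; omega, hocck]
      have hslice : PySem.List.slice text.toList (some (-((k : Nat) : Int))) (some ((j : Nat) : Int))
          = List.take (j - (text.toList.length - k)) (List.drop (text.toList.length - k) text.toList) := by
        show List.take (PySem.List.clampIdx text.toList.length ((j : Nat) : Int)
            - PySem.List.clampIdx text.toList.length (-((k : Nat) : Int)))
          (List.drop (PySem.List.clampIdx text.toList.length (-((k : Nat) : Int))) text.toList) = _
        rw [PySem.List.clampIdx_neg_natCast _ k hk]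
        have hj0 : PySem.List.clampIdx text.toList.length ((j : Nat) : Int) = j := by
          unfold PySem.List.clampIdx
          rw [if_neg (by omega), Int.toNat_natCast]
          exact min_eq_left hjle
        rw [hj0]
      rw [hslice]
      apply pvOfListNe
      by_cases hcase : j ≤ text.toList.length - k
      · rw [show j - (text.toList.length - k) = 0 by omega, List.take_zero]
        simp
      · rw [← List.drop_take, pvGetLastDrop _ _ (by rw [List.length_take]; omega), hjlast]
        decide
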